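-- pv_equiv track=rewrite | github.com/unbytes/tep | 23.1/L1/D.py | solve
-- ===== SOURCE A (Python) =====
-- def solve(l, r):
--     lb, rb = bin(l)[2:], bin(r)[2:]
--
--     ln = max(len(lb), len(rb))
--     lb, rb = lb.zfill(ln), rb.zfill(ln)
--
--     for i in range(ln):
--         if lb[i] != rb[i]:
--             return (1 << (ln - i)) - 1
--     return 0
-- ===== SOURCE B (Python) =====
-- def solve(l, r):
--     # mask covering every bit up to and including the most significant bit where l and r differ
--     return (1 << (l ^ r).bit_length()) - 1
-- ===== Notes on version B (the rewrite author's own statement) =====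
-- stated objective: simpler
-- what changed: Replaces the binary-string construction (bin/zfill and a left-to-right character scan) by a single XOR plus bit_length that locates the most significant differing bit directly; Pre_ restricts to the problem's natural domain of nonnegative integers, because on negative arguments bin(x)[2:] leaves the 'b' of '-0b' in the compared string and A's value there is an accident of that slicing.
-- outside the precondition, e.g. on solve(-1, 0): A returns 3, B returns 1
import Mathlib
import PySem

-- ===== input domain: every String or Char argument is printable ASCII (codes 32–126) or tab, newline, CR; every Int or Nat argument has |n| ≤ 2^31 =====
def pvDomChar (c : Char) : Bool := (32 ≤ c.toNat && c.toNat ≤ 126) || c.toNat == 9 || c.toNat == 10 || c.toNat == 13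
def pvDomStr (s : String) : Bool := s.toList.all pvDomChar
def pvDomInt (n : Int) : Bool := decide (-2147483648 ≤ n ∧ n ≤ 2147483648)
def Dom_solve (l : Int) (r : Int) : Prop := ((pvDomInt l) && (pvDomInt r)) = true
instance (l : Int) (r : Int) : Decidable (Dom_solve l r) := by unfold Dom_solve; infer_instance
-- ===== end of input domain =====

-- B replaces A's binary-string construction (bin/zfill and a left-to-right character scan)
-- by a single XOR plus bit_length; equality of the return values is proved on the
-- problem's natural domain of nonnegative arguments (Pre_solve).

-- ===== PORT A =====
-- bin(n)[2:] for a natural n, msb first (Python builds the digits by repeated //2)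
def natBinAux (n : Nat) : List Char :=
  if n = 0 then []
  else natBinAux (n / 2) ++ [if n % 2 = 1 then '1' else '0']
decreasing_by exact Nat.div_lt_self (Nat.pos_of_ne_zero (by assumption)) (by norm_num)

def natBin (n : Nat) : List Char := if n = 0 then ['0'] else natBinAux n

-- bin(x)[2:] : for x < 0 Python gives '-0b…' and slicing leaves 'b' + digits
def binDigits (x : Int) : List Char :=
  if x < 0 then 'b' :: natBin (-x).toNat else natBin x.toNat

-- str.zfill: pad with '0' on the left (no leading '+'/'-' occurs in these strings)
def zfill (s : List Char) (n : Nat) : List Char := List.replicate (n - s.length) '0' ++ s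

-- the for-loop over i in range(ln): first position with differing chars returns
-- (1 << (ln - i)) - 1, i.e. 2^(length of the remaining suffix incl. position i) - 1
def scanDiff : List Char → List Char → Int
  | a :: as, b :: bs => if a ≠ b then 2 ^ (as.length + 1) - 1 else scanDiff as bs
  | _, _ => 0

def solve (l : Int) (r : Int) : Int :=
  let lb := binDigits l
  let rb := binDigits r
  let ln := max lb.length rb.length
  scanDiff (zfill lb ln) (zfill rb ln)

-- ===== PORT B =====
-- Python's n.bit_length() (= bit length of |n|)
def bitlen (n : Nat) : Nat := if n = 0 then 0 else bitlen (n / 2) + 1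
decreasing_by exact Nat.div_lt_self (Nat.pos_of_ne_zero (by assumption)) (by norm_num)

-- (1 << (l ^ r).bit_length()) - 1; Lean's Int ^^^ is Python's two's-complement xor
def solve_alt (l : Int) (r : Int) : Int := 2 ^ (bitlen (Int.xor l r).natAbs) - 1

-- ===== PRECONDITION & SPEC =====
-- Pre_ restricts to the problem's natural domain of nonnegative integers: on negative
-- arguments bin(x)[2:] leaves the 'b' of '-0b' in the compared string, so A's value
-- there is an accident of that slicing.
def Pre_solve (l : Int) (r : Int) : Prop := 0 ≤ l ∧ 0 ≤ r
instance (l : Int) (r : Int) : Decidable (Pre_solve l r) := by unfold Pre_solve; infer_instance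

def pvWitness_solve : Int × Int := (5, 12)

def Spec_solve (l : Int) (r : Int) (out : Int) : Prop := out = solve_alt l r
instance (l : Int) (r : Int) (out : Int) : Decidable (Spec_solve l r out) := by unfold Spec_solve; infer_instance

-- ===== CLAIM =====
def Claim_equal_solve : Prop := ∀ (l : Int) (r : Int), Dom_solve l r → Pre_solve l r → Spec_solve l r (solve l r)

-- ===== LEMMAS AND PROOFS =====

def bchar (b : Bool) : Char := if b then '1' else '0'

-- the binary representation of a padded (or truncated) to its n low bits, msb first
def padBin (a : Nat) (n : Nat) : List Char :=
  (List.range n).reverse.map (fun i => bchar (a.testBit i))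

theorem bitlen_zero : bitlen 0 = 0 := by rw [bitlen]; simp
theorem bitlen_pos {x : Nat} (h : x ≠ 0) : bitlen x = bitlen (x / 2) + 1 := by
  rw [bitlen]; simp [h]

theorem bitlen_le_iff (n : Nat) : ∀ x : Nat, bitlen x ≤ n ↔ x < 2 ^ n := by
  induction n with
  | zero =>
    intro x
    constructor
    · intro h
      rcases Nat.eq_zero_or_pos x with h0 | h0
      · simp [h0]
      · rw [bitlen_pos (Nat.pos_iff_ne_zero.mp h0)] at h; omega
    · intro h
      have : x = 0 := by simpa using h
      simp [this, bitlen_zero]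
  | succ n ih =>
    intro x
    rcases Nat.eq_zero_or_pos x with h0 | h0
    · simp [h0, bitlen_zero]
      try positivity
    · rw [bitlen_pos (Nat.pos_iff_ne_zero.mp h0)]
      rw [Nat.succ_le_succ_iff, ih]
      rw [pow_succ]
      omega

theorem padBin_zero (a : Nat) : padBin a 0 = [] := by simp [padBin]

theorem padBin_succ (a n : Nat) :
    padBin a (n + 1) = bchar (a.testBit n) :: padBin a n := by
  simp [padBin, List.range_succ]

theorem padBin_length (a n : Nat) : (padBin a n).length = n := by simp [padBin]

theorem padBin_shift (a : Nat) : ∀ n, padBin a (n + 1) = padBin (a / 2) n ++ [bchar (a.testBit 0)] := by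
  intro n
  induction n with
  | zero => simp [padBin, List.range_succ]
  | succ n ih =>
    rw [padBin_succ a (n+1), ih, padBin_succ (a/2) n]
    simp [Nat.testBit_div_two]

theorem natBinAux_eq (a : Nat) : natBinAux a = padBin a (bitlen a) := by
  induction a using Nat.strong_induction_on with
  | _ a ih =>
    rw [natBinAux]
    rcases Nat.eq_zero_or_pos a with h0 | h0
    · simp [h0, bitlen_zero, padBin_zero]
    · have hne : a ≠ 0 := Nat.pos_iff_ne_zero.mp h0
      simp only [hne, if_false]
      rw [ih (a / 2) (Nat.div_lt_self h0 (by norm_num)), bitlen_pos hne, padBin_shift]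
      congr 1
      rcases Nat.mod_two_eq_zero_or_one a with h | h <;>
        simp [bchar, Nat.testBit_zero, h]

theorem natBin_eq (a : Nat) : natBin a = padBin a (max (bitlen a) 1) := by
  rw [natBin]
  rcases Nat.eq_zero_or_pos a with h0 | h0
  · simp [h0, bitlen_zero, padBin]
    simp [bchar]
  · have hne : a ≠ 0 := Nat.pos_iff_ne_zero.mp h0
    have h1 : 1 ≤ bitlen a := by rw [bitlen_pos hne]; omega
    simp [hne, natBinAux_eq, Nat.max_eq_left h1]

theorem zfill_padBin {a k : Nat} (h : a < 2 ^ k) : ∀ n, k ≤ n →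
    List.replicate (n - k) '0' ++ padBin a k = padBin a n := by
  intro n
  induction n with
  | zero => intro hk; interval_cases k; simp
  | succ n ih =>
    intro hk
    rcases Nat.lt_or_ge k (n + 1) with hlt | hge
    · have hk' : k ≤ n := by omega
      have hb : a.testBit n = false := by
        apply Nat.testBit_lt_two_pow
        exact lt_of_lt_of_le h (Nat.pow_le_pow_right (by norm_num) hk')
      rw [padBin_succ, hb]
      have : n + 1 - k = (n - k) + 1 := by omega
      rw [this, List.replicate_succ]
      simp only [List.cons_append, ih hk']
      rfl
    · have : k = n + 1 := by omega
      subst this; simp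

theorem bchar_inj (s t : Bool) : bchar s = bchar t ↔ s = t := by
  cases s <;> cases t <;> simp [bchar]

theorem scan_main : ∀ n a b : Nat,
    scanDiff (padBin a n) (padBin b n) = 2 ^ (bitlen ((a ^^^ b) % 2 ^ n)) - 1 := by
  intro n
  induction n with
  | zero => intro a b; simp [padBin_zero, scanDiff, Nat.mod_one, bitlen_zero]
  | succ n ih =>
    intro a b
    rw [padBin_succ a, padBin_succ b, scanDiff]
    by_cases hb : a.testBit n = b.testBit n
    · have hchar : bchar (a.testBit n) = bchar (b.testBit n) := by rw [hb]
      simp only [hchar, ne_eq, not_true_eq_false, if_false, ih]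
      have hx : (a ^^^ b).testBit n = false := by
        simp [Nat.testBit_xor, hb]
      have : (a ^^^ b) % 2 ^ (n + 1) = (a ^^^ b) % 2 ^ n := by
        rw [Nat.mod_pow_succ]
        have := Nat.testBit_eq_decide_div_mod_eq (x := a ^^^ b) (i := n)
        rw [hx] at this
        have h0 : (a ^^^ b) / 2 ^ n % 2 = 0 := by
          rcases Nat.mod_two_eq_zero_or_one ((a ^^^ b) / 2 ^ n) with h | h
          · exact h
          · simp [h] at this
        rw [h0]; ring
      rw [this]
    · have hchar : bchar (a.testBit n) ≠ bchar (b.testBit n) := by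
        rw [ne_eq, bchar_inj]; exact hb
      simp only [ne_eq, hchar, not_false_eq_true, if_true, padBin_length]
      have hx : (a ^^^ b).testBit n = true := by
        simp [Nat.testBit_xor]
        cases h1 : a.testBit n <;> cases h2 : b.testBit n <;> simp_all
      have hxm : ((a ^^^ b) % 2 ^ (n + 1)).testBit n = true := by
        rw [Nat.testBit_mod_two_pow]
        simp [hx]
      have hlo : 2 ^ n ≤ (a ^^^ b) % 2 ^ (n + 1) := by
        by_contra hcon
        rw [Nat.not_le] at hcon
        have := Nat.testBit_lt_two_pow hcon
        rw [hxm] at this; cases this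
      have hhi : (a ^^^ b) % 2 ^ (n + 1) < 2 ^ (n + 1) := Nat.mod_lt _ (by positivity)
      have : bitlen ((a ^^^ b) % 2 ^ (n + 1)) = n + 1 := by
        have hle : bitlen ((a ^^^ b) % 2 ^ (n + 1)) ≤ n + 1 := (bitlen_le_iff _ _).mpr hhi
        have hgt : ¬ bitlen ((a ^^^ b) % 2 ^ (n + 1)) ≤ n := by
          rw [bitlen_le_iff]; omega
        omega
      rw [this]

theorem natBin_length (a : Nat) : (natBin a).length = max (bitlen a) 1 := by
  rw [natBin_eq, padBin_length]

theorem lt_pow_max1 (a : Nat) : a < 2 ^ max (bitlen a) 1 :=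
  (bitlen_le_iff _ a).mp (le_max_left _ _)

theorem zfill_natBin {a n : Nat} (h : max (bitlen a) 1 ≤ n) :
    zfill (natBin a) n = padBin a n := by
  rw [natBin_eq, zfill, padBin_length]
  exact zfill_padBin (lt_pow_max1 a) n h

theorem xor_lt_pow {a b n : Nat} (ha : a < 2 ^ n) (hb : b < 2 ^ n) : a ^^^ b < 2 ^ n :=
  Nat.xor_lt_two_pow ha hb

theorem natAbs_xor_nonneg {l r : Int} (hl : 0 ≤ l) (hr : 0 ≤ r) :
    (Int.xor l r).natAbs = l.toNat ^^^ r.toNat := by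
  lift l to Nat using hl
  lift r to Nat using hr
  simp [Int.xor]

theorem solve_spec' (l r : Int) (hl : 0 ≤ l) (hr : 0 ≤ r) : solve l r = solve_alt l r := by
  set a := l.toNat with ha
  set b := r.toNat with hb
  have hla : (natBin a).length = max (bitlen a) 1 := natBin_length a
  have hlb : (natBin b).length = max (bitlen b) 1 := natBin_length b
  simp only [solve, binDigits, if_neg (by omega : ¬ l < 0), if_neg (by omega : ¬ r < 0),
    ← ha, ← hb]
  simp only [hla, hlb]
  set n := max (max (bitlen a) 1) (max (bitlen b) 1) with hn
  have hz1 : zfill (natBin a) n = padBin a n := zfill_natBin (by omega)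
  have hz2 : zfill (natBin b) n = padBin b n := zfill_natBin (by omega)
  rw [hz1, hz2, scan_main]
  have hxa : a < 2 ^ n :=
    lt_of_lt_of_le (lt_pow_max1 a) (Nat.pow_le_pow_right (by norm_num) (by omega))
  have hxb : b < 2 ^ n :=
    lt_of_lt_of_le (lt_pow_max1 b) (Nat.pow_le_pow_right (by norm_num) (by omega))
  rw [Nat.mod_eq_of_lt (xor_lt_pow hxa hxb)]
  rw [solve_alt, natAbs_xor_nonneg hl hr, ← ha, ← hb]

-- ===== VERDICT =====
theorem solve_spec : Claim_equal_solve := by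
  intro l r _ hpre
  unfold Spec_solve
  exact solve_spec' l r hpre.1 hpre.2
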